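-- pv_equiv track=rewrite | github.com/SimpleMg/python_test | calcPiMachin.py | suite_fibonnacci
-- ===== SOURCE A (Python) =====
-- def suite_fibonnacci(n: int) -> list[int]:
--     suite_fibo = []
--     for i in range(n + 1):
--         if i == 0:
--             suite_fibo.append(0)
--         elif i == 1:
--             suite_fibo.append(1)
--         else:
--             suite_fibo.append(suite_fibo[i - 1] + suite_fibo[i - 2])
--     return suite_fibo[3::]
-- ===== SOURCE B (Python) =====
-- def suite_fibonnacci(n: int) -> list[int]:
--     def fib_pair(k: int) -> tuple[int, int]:
--         # fast doubling: returns (F(k), F(k+1))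
--         if k == 0:
--             return (0, 1)
--         a, b = fib_pair(k // 2)
--         c = a * (2 * b - a)
--         d = a * a + b * b
--         if k % 2 == 0:
--             return (c, d)
--         return (d, c + d)
--     return [fib_pair(i)[0] for i in range(3, n + 1)]
-- ===== Notes on version B (the rewrite author's own statement) =====
-- stated objective: alternative
-- what changed: B computes each requested Fibonacci number independently by the fast-doubling divide-and-conquer identities (F(2k)=F(k)(2F(k+1)-F(k)), F(2k+1)=F(k)^2+F(k+1)^2) over a range(3, n+1) comprehension, instead of A's single linear recurrence pass over a memo list sliced at the end.
import Mathlib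
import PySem

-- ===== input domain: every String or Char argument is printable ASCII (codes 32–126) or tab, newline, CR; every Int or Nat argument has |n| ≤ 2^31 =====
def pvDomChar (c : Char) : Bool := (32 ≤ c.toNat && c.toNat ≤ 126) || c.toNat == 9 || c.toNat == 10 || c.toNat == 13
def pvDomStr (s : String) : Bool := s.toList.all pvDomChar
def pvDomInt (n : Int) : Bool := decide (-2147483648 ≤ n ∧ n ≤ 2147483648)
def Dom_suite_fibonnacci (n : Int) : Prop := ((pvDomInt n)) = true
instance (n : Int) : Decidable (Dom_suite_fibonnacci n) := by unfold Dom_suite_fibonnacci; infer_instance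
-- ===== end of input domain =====

-- B computes each term independently by fast-doubling divide and conquer over range(3, n+1), instead of A's linear recurrence over a memo list sliced at the end (alternative algorithm; same return value).

-- ===== PORT A =====
-- suite_fibo[i-1] / suite_fibo[i-2] are always in range when read, so pyGetD with default 0 is exact here.
def fibStepA (acc : List Int) (i : Int) : List Int :=
  if i = 0 then acc ++ [0]
  else if i = 1 then acc ++ [1]
  else acc ++ [PySem.List.pyGetD acc (i - 1) 0 + PySem.List.pyGetD acc (i - 2) 0]

def suite_fibonnacci (n : Int) : List Int :=
  PySem.List.slice ((PySem.List.pyRange 0 (n + 1) 1).foldl fibStepA []) (some 3) none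

-- ===== PORT B =====
-- fast doubling: fibPair k = (F(k), F(k+1)); recursion on k // 2, exactly Source B's fib_pair
def fibPair : Nat → Int × Int
  | 0 => (0, 1)
  | (k + 1) =>
    let p := fibPair ((k + 1) / 2)
    let a := p.1
    let b := p.2
    let c := a * (2 * b - a)
    let d := a * a + b * b
    if (k + 1) % 2 = 0 then (c, d) else (d, c + d)
decreasing_by omega

-- indices produced by range(3, n+1) are nonnegative, so .toNat is exact
def suite_fibonnacci_alt (n : Int) : List Int :=
  (PySem.List.pyRange 3 (n + 1) 1).map (fun i => (fibPair i.toNat).1)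

-- ===== PRECONDITION & SPEC =====
def Spec_suite_fibonnacci (n : Int) (out : List Int) : Prop := out = suite_fibonnacci_alt n
instance (n : Int) (out : List Int) : Decidable (Spec_suite_fibonnacci n out) := by unfold Spec_suite_fibonnacci; infer_instance

-- ===== CLAIM =====
def Claim_equal_suite_fibonnacci : Prop := ∀ (n : Int), Dom_suite_fibonnacci n → Spec_suite_fibonnacci n (suite_fibonnacci n)

-- ===== LEMMAS AND PROOFS =====

def fibsUpTo (m : Nat) : List Int := (List.range m).map (fun k => (Nat.fib k : Int))

theorem fibsUpTo_succ (m : Nat) : fibsUpTo (m + 1) = fibsUpTo m ++ [(Nat.fib m : Int)] := by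
  simp [fibsUpTo, List.range_succ]

theorem foldA_eq (m : Nat) :
    (PySem.List.pyRange 0 (m : Int) 1).foldl fibStepA [] = fibsUpTo m := by
  induction m with
  | zero => simp [PySem.List.pyRange_one_eq_nil, fibsUpTo]
  | succ m ih =>
    have hcast : ((m + 1 : Nat) : Int) = (m : Int) + 1 := by omega
    rw [hcast, PySem.List.pyRange_one_succ_right (by positivity), List.foldl_append, ih,
      fibsUpTo_succ, List.foldl_cons, List.foldl_nil]
    match m with
    | 0 => decide
    | 1 => decide
    | (k + 2) =>
      simp only [fibStepA]
      rw [if_neg (show ¬((k + 2 : Nat) : Int) = 0 by omega),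
        if_neg (show ¬((k + 2 : Nat) : Int) = 1 by omega),
        show ((k + 2 : Nat) : Int) - 1 = ((k + 1 : Nat) : Int) by omega,
        show ((k + 2 : Nat) : Int) - 2 = ((k : Nat) : Int) by omega,
        PySem.List.pyGetD_natCast, PySem.List.pyGetD_natCast]
      unfold fibsUpTo
      rw [PySem.List.getD_map_range _ (k + 2) (k + 1) 0 (by omega),
        PySem.List.getD_map_range _ (k + 2) k 0 (by omega)]
      rw [Nat.fib_add_two]
      push_cast
      ring_nf

theorem fibPair_eq (k : Nat) : fibPair k = ((Nat.fib k : Int), (Nat.fib (k + 1) : Int)) := by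
  induction k using Nat.strong_induction_on with
  | _ k ih =>
    match k with
    | 0 => simp [fibPair]
    | (j + 1) =>
      rw [fibPair]
      rw [ih ((j + 1) / 2) (by omega)]
      generalize hq : (j + 1) / 2 = q
      have hle : Nat.fib q ≤ 2 * Nat.fib (q + 1) :=
        le_trans Nat.fib_le_fib_succ (by omega)
      by_cases h : (j + 1) % 2 = 0
      · have h2 : j + 1 = 2 * q := by omega
        simp only [if_pos h, Prod.mk.injEq]
        constructor
        · rw [h2, Nat.fib_two_mul, Nat.cast_mul, Nat.cast_sub hle]
          push_cast
          ring
        · rw [show (j + 1) + 1 = 2 * q + 1 by omega, Nat.fib_two_mul_add_one]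
          push_cast
          ring
      · have h2 : j + 1 = 2 * q + 1 := by omega
        simp only [if_neg h, Prod.mk.injEq]
        constructor
        · rw [h2, Nat.fib_two_mul_add_one]
          push_cast
          ring
        · rw [show (j + 1) + 1 = 2 * (q + 1) by omega, Nat.fib_two_mul, Nat.cast_mul,
            Nat.cast_sub (le_trans Nat.fib_le_fib_succ (by omega)),
            show Nat.fib (q + 1 + 1) = Nat.fib q + Nat.fib (q + 1) from Nat.fib_add_two]
          push_cast
          ring

-- ===== VERDICT =====
theorem suite_fibonnacci_spec : Claim_equal_suite_fibonnacci := by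
  intro n _
  show suite_fibonnacci n = suite_fibonnacci_alt n
  unfold suite_fibonnacci suite_fibonnacci_alt
  by_cases h : n + 1 ≤ 3
  · -- both sides empty or a short literal prefix: at most 3 entries built, slice from 3 empty
    have hB : PySem.List.pyRange 3 (n + 1) 1 = [] := PySem.List.pyRange_one_eq_nil h
    rw [hB, List.map_nil]
    by_cases h0 : n + 1 ≤ 0
    · rw [PySem.List.pyRange_one_eq_nil h0]; rfl
    · obtain ⟨m, hm⟩ : ∃ m : Nat, n + 1 = (m : Int) := ⟨(n + 1).toNat, by omega⟩
      have hm3 : m ≤ 3 := by omega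
      rw [hm, foldA_eq]
      interval_cases m <;> decide
  · obtain ⟨k, hk⟩ : ∃ k : Nat, n + 1 = ((k : Int) + 3) := ⟨(n - 2).toNat, by omega⟩
    rw [hk, show (k : Int) + 3 = ((k + 3 : Nat) : Int) from by omega, foldA_eq,
      show ((k + 3 : Nat) : Int) = (k : Int) + 3 from by omega]
    rw [show (3 : Int) = ((3 : Nat) : Int) from rfl, PySem.List.slice_from_natCast]
    rw [PySem.List.pyRange_one]
    unfold fibsUpTo
    rw [show k + 3 = 3 + k from by omega, List.range_add, List.map_append,
      List.drop_append_of_le_length (by simp)]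
    rw [show ((k:Int) + ((3:Nat):Int) - ((3:Nat):Int)).toNat = k by omega,
      show List.drop 3 (List.map (fun k => ((Nat.fib k : Int))) (List.range 3)) = [] from by simp,
      List.nil_append]
    simp only [List.map_map]
    refine List.map_congr_left (fun j hj => ?_)
    simp only [Function.comp_apply]
    rw [show (((3:Nat):Int) + (j:Int)).toNat = 3 + j by omega, fibPair_eq]
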